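-- pv_equiv track=rewrite | github.com/aequorea/zed | zed.py | do_line
-- ===== SOURCE A (Python) =====
-- def backscan(n, buf, p):
--     n = -n
--     while n:
--         if p < 0:
--             return 0
--         p -= 1
--         if buf[p] == '\n':
--             n -= 1
--     return p+1
--
-- def do_line(n, buf, p):
--     if n <= 0:
--         p = backscan(n-1, buf, p)
--     else:
--         while n:
--             if p >= len(buf):
--                 p = len(buf)
--                 return p
--             ch = buf[p]
--             if ch == '\n':
--                 n -= 1
--             p += 1
--     return p
-- ===== SOURCE B (Python) =====
-- def do_line(n, buf, p):
--     nls = [i for i, ch in enumerate(buf) if ch == '\n']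
--     k = len([i for i in nls if i < p])
--     if n > 0:
--         j = k + n - 1
--         return nls[j] + 1 if j < len(nls) else len(buf)
--     j = k - (1 - n)
--     return nls[j] + 1 if j >= 0 else 0
-- ===== Notes on version B (the rewrite author's own statement) =====
-- stated objective: alternative
-- what changed: Replaces A's char-by-char position-pointer scans (forward while loop, backward helper) with an index table: build the list of all newline offsets once, count those below p, and read the answer off by direct indexing/arithmetic.
-- outside the precondition, e.g. on do_line(1, 'a\nb', -2): A returns -1, B returns 2; on do_line(-1, 'ab', 5): A raises IndexError, B returns 0; on do_line(0, '', 0): A raises IndexError, B returns 0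
import Mathlib
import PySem

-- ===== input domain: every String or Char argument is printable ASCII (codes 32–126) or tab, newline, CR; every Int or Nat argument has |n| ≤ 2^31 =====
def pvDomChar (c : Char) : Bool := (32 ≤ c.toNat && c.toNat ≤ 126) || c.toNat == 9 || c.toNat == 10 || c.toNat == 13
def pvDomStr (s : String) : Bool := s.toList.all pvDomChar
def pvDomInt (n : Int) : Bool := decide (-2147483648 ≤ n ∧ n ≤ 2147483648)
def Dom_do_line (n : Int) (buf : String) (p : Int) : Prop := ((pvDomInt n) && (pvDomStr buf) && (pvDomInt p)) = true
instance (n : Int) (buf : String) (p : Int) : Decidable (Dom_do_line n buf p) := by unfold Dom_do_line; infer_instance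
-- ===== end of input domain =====

-- B replaces A's char-by-char pointer scans with a newline-offset table read off by counting and
-- indexing (objective: alternative; not faster — it always scans the whole buffer once).

-- ===== PORT A =====
-- Loop of backscan: `while n: if p < 0: return 0; p -= 1; if buf[p] == '\n': n -= 1` then `return p+1`.
def backscanLoop (buf : List Char) (cnt : Int) (p : Int) : Int :=
  if cnt = 0 then p + 1
  else if p < 0 then 0
  else
    match PySem.List.pyGet? buf (p - 1) with
    | none => 0   -- Python raises IndexError here (excluded by Pre_)
    | some c => backscanLoop buf (if c = '\n' then cnt - 1 else cnt) (p - 1)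
termination_by (p + 1).toNat
decreasing_by omega

def backscan (n : Int) (buf : List Char) (p : Int) : Int :=
  backscanLoop buf (-n) p

-- Forward loop of do_line: `while n: if p >= len(buf): return len(buf); ch = buf[p]; if ch=='\n': n -= 1; p += 1`.
def fwdLoop (buf : List Char) (cnt : Int) (p : Int) : Int :=
  if cnt = 0 then p
  else if (buf.length : Int) ≤ p then (buf.length : Int)
  else
    match PySem.List.pyGet? buf p with
    | none => 0   -- unreachable for 0 ≤ p < len(buf) (Python raises only below -len)
    | some c => fwdLoop buf (if c = '\n' then cnt - 1 else cnt) (p + 1)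
termination_by ((buf.length : Int) - p).toNat
decreasing_by omega

def do_line (n : Int) (buf : String) (p : Int) : Int :=
  if n ≤ 0 then backscan (n - 1) buf.toList p
  else fwdLoop buf.toList n p

-- ===== PORT B =====
-- `nls = [i for i, ch in enumerate(buf) if ch == '\n']`
def nlsOf (buf : List Char) : List Int :=
  ((PySem.List.enumerate buf 0).filter (fun e => e.2 == '\n')).map (fun e => e.1)

-- `k = len([i for i in nls if i < p])`
def kOf (buf : List Char) (p : Int) : Int :=
  (((nlsOf buf).filter (fun i => decide (i < p))).length : Int)

def do_line_alt (n : Int) (buf : String) (p : Int) : Int :=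
  let nls := nlsOf buf.toList
  let k := kOf buf.toList p
  if 0 < n then
    let j := k + n - 1
    if j < (nls.length : Int) then (PySem.List.pyGet? nls j).getD 0 + 1
    else (buf.toList.length : Int)
  else
    let j := k - (1 - n)
    if 0 ≤ j then (PySem.List.pyGet? nls j).getD 0 + 1 else 0

-- ===== PRECONDITION & SPEC =====
-- Pre_ restricts p to the buffer's valid position range: outside it A raises IndexError
-- (p > len(buf) for n ≤ 0; p = 0 on an empty buffer for n ≤ 0; p < -len(buf) for n > 0) or, for
-- -len(buf) ≤ p < 0 with n > 0, A's value (possibly a negative position) is an artefact of Python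
-- negative-index wraparound on a position no caller can hold.
def Pre_do_line (n : Int) (buf : String) (p : Int) : Prop :=
  (0 < n → 0 ≤ p) ∧ (n ≤ 0 → p ≤ (buf.toList.length : Int) ∧ (buf = "" → p < 0))
instance (n : Int) (buf : String) (p : Int) : Decidable (Pre_do_line n buf p) := by
  unfold Pre_do_line; infer_instance

def pvWitness_do_line : Int × String × Int := (1, "a\nb", 0)

def Spec_do_line (n : Int) (buf : String) (p : Int) (out : Int) : Prop := out = do_line_alt n buf p
instance (n : Int) (buf : String) (p : Int) (out : Int) : Decidable (Spec_do_line n buf p out) := by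
  unfold Spec_do_line; infer_instance

-- ===== CLAIM (what is proved, stated in full; the proofs are below) =====
def Claim_equal_do_line : Prop := ∀ (n : Int) (buf : String) (p : Int), Dom_do_line n buf p → Pre_do_line n buf p → Spec_do_line n buf p (do_line n buf p)

-- ===== LEMMAS AND PROOFS =====

-- every newline offset is a valid index
lemma nls_bounds (l : List Char) : ∀ x ∈ nlsOf l, 0 ≤ x ∧ x < (l.length : Int) := by
  intro x hx
  simp only [nlsOf, List.mem_map, List.mem_filter] at hx
  obtain ⟨e, ⟨he, _⟩, rfl⟩ := hx
  rw [PySem.List.mem_enumerate_iff] at he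
  obtain ⟨k, hk, rfl⟩ := he
  refine ⟨by simp, ?_⟩
  simp
  omega

-- the offsets are strictly increasing
lemma nls_pairwise (l : List Char) : (nlsOf l).Pairwise (· < ·) := by
  apply List.Pairwise.map
  · exact fun a b h => h
  · exact (PySem.List.pairwise_lt_enumerate l 0).filter _

lemma nls_nodup (l : List Char) : (nlsOf l).Nodup :=
  (nls_pairwise l).imp (fun h => ne_of_lt h)

-- membership characterisation
lemma mem_nls (l : List Char) (j : Nat) (hj : j < l.length) :
    ((j : Int) ∈ nlsOf l ↔ l[j] = '\n') := by
  simp only [nlsOf, List.mem_map, List.mem_filter]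
  constructor
  · rintro ⟨e, ⟨he, hnl⟩, h1⟩
    rw [PySem.List.mem_enumerate_iff] at he
    obtain ⟨k, hk, rfl⟩ := he
    simp at hnl h1
    subst h1
    exact hnl
  · intro h
    refine ⟨((j : Int), l[j]), ⟨?_, by simp [h]⟩, rfl⟩
    rw [PySem.List.mem_enumerate_iff]
    exact ⟨j, hj, by simp⟩

-- counting: k at p+1 versus k at p
lemma count_lt_succ (N : List Int) (hnd : N.Nodup) (q : Int) :
    (N.filter (fun i => decide (i < q + 1))).length =
      (N.filter (fun i => decide (i < q))).length + (if q ∈ N then 1 else 0) := by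
  induction N with
  | nil => simp
  | cons a t ih =>
    rcases List.nodup_cons.mp hnd with ⟨ha, ht⟩
    have ihe := ih ht
    simp only [List.filter_cons, decide_eq_true_eq]
    by_cases haq : a = q
    · subst haq
      rw [if_pos (show a < a + 1 by omega), if_neg (show ¬ a < a by omega),
        List.length_cons, ihe, if_neg ha, if_pos (List.mem_cons_self ..)]
    · have hmq : (q ∈ a :: t) ↔ q ∈ t := by
        constructor
        · intro h
          rcases List.mem_cons.mp h with rfl | h
          · exact absurd rfl haq
          · exact h
        · exact List.mem_cons_of_mem _
      by_cases h1 : a < q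
      · rw [if_pos (show a < q + 1 by omega), if_pos h1, List.length_cons, List.length_cons, ihe]
        simp only [hmq]
        omega
      · rw [if_neg (show ¬ a < q + 1 by omega), if_neg h1, ihe]
        simp only [hmq]

-- the k-th element of a strictly sorted list, k = number of elements below a member q, is q itself
lemma get_count (N : List Int) (hp : N.Pairwise (· < ·)) (q : Int) (hq : q ∈ N) :
    (N.filter (fun i => decide (i < q))).length < N.length ∧
      N[(N.filter (fun i => decide (i < q))).length]? = some q := by
  induction N with
  | nil => simp at hq
  | cons a t ih =>
    rcases List.pairwise_cons.mp hp with ⟨hat, htp⟩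
    by_cases haq : a = q
    · subst haq
      have h0 : ((a :: t).filter (fun i => decide (i < a))).length = 0 := by
        simp only [List.length_eq_zero_iff, List.filter_eq_nil_iff]
        intro x hx
        rcases List.mem_cons.mp hx with rfl | hx
        · simp
        · simpa using (by have := hat x hx; omega : ¬ x < a)
      rw [h0]; simp
    · have hqt : q ∈ t := (List.mem_cons.mp hq).resolve_left (fun h => haq h.symm)
      have haq' : a < q := hat q hqt
      have : ((a :: t).filter (fun i => decide (i < q))).length =
          (t.filter (fun i => decide (i < q))).length + 1 := by
        simp [haq']
      rw [this]
      rcases ih htp hqt with ⟨h1, h2⟩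
      constructor
      · simpa using Nat.succ_lt_succ h1
      · simpa using h2

-- k saturates once p is at or past the end of the buffer
lemma k_all (l : List Char) (p : Int) (h : (l.length : Int) ≤ p) :
    kOf l p = ((nlsOf l).length : Int) := by
  unfold kOf
  have h2 : (nlsOf l).filter (fun i => decide (i < p)) = nlsOf l :=
    List.filter_eq_self.mpr (fun x hx => by
      have := nls_bounds l x hx
      simp only [decide_eq_true_eq]
      omega)
  rw [h2]

-- k is 0 for non-positive p
lemma k_nonpos (l : List Char) (p : Int) (h : p ≤ 0) : kOf l p = 0 := by
  unfold kOf
  simp only [Int.natCast_eq_zero, List.length_eq_zero_iff, List.filter_eq_nil_iff]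
  intro x hx
  have := nls_bounds l x hx
  simp; omega

lemma k_succ (l : List Char) (p : Int) :
    kOf l (p + 1) = kOf l p + (if p ∈ nlsOf l then 1 else 0) := by
  unfold kOf
  rw [count_lt_succ _ (nls_nodup l) p]
  split <;> simp

-- the forward scan equals the table lookup
lemma fwd_eq (l : List Char) : ∀ (m : Nat) (cnt p : Int), ((l.length : Int) - p).toNat = m →
    1 ≤ cnt → 0 ≤ p →
    fwdLoop l cnt p =
      (if kOf l p + cnt - 1 < ((nlsOf l).length : Int)
       then (PySem.List.pyGet? (nlsOf l) (kOf l p + cnt - 1)).getD 0 + 1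
       else (l.length : Int)) := by
  intro m
  induction m using Nat.strong_induction_on with
  | _ m ih =>
    intro cnt p hm hc hp
    rw [fwdLoop]
    rw [if_neg (by omega : ¬ cnt = 0)]
    by_cases hge : (l.length : Int) ≤ p
    · rw [if_pos hge, k_all l p hge, if_neg (by omega)]
    · have hlt : p < (l.length : Int) := by omega
      rw [if_neg hge]
      have hg : PySem.List.pyGet? l p = some l[p.toNat] :=
        PySem.List.pyGet?_eq_some_getElem l hp (by omega)
      rw [hg]
      show fwdLoop l (if l[p.toNat] = '\n' then cnt - 1 else cnt) (p + 1) = _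
      have hpn : ((p.toNat : Int)) = p := by omega
      have hjlt : p.toNat < l.length := by omega
      by_cases hnl : l[p.toNat] = '\n'
      · have hmem : p ∈ nlsOf l := by
          rw [← hpn]; exact (mem_nls l p.toNat hjlt).mpr hnl
        have hk1 : kOf l (p + 1) = kOf l p + 1 := by rw [k_succ, if_pos hmem]
        have hgc := get_count (nlsOf l) (nls_pairwise l) p hmem
        rw [if_pos hnl]
        by_cases hc1 : cnt = 1
        · subst hc1
          rw [fwdLoop, if_pos (by norm_num : (1:Int) - 1 = 0)]
          have hidx : kOf l p + 1 - 1 = kOf l p := by ring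
          rw [hidx]
          unfold kOf at *
          rw [if_pos (by exact_mod_cast hgc.1), PySem.List.pyGet?_natCast]
          rw [hgc.2]
          simp
        · have := ih (((l.length : Int) - (p + 1)).toNat) (by omega) (cnt - 1) (p + 1)
            rfl (by omega) (by omega)
          rw [this, hk1]
          have hidx : kOf l p + 1 + (cnt - 1) - 1 = kOf l p + cnt - 1 := by ring
          rw [hidx]
      · have hmem : p ∉ nlsOf l := by
          rw [← hpn]; exact fun h => hnl ((mem_nls l p.toNat hjlt).mp h)
        have hk1 : kOf l (p + 1) = kOf l p := by rw [k_succ, if_neg hmem]; ring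
        rw [if_neg hnl]
        have := ih (((l.length : Int) - (p + 1)).toNat) (by omega) cnt (p + 1)
          rfl hc (by omega)
        rw [this, hk1]

-- the backward scan equals the table lookup
lemma bwd_eq (l : List Char) : ∀ (m : Nat) (cnt p : Int), (p + 1).toNat = m →
    1 ≤ cnt → p ≤ (l.length : Int) →
    backscanLoop l cnt p =
      (if 0 ≤ kOf l p - cnt
       then (PySem.List.pyGet? (nlsOf l) (kOf l p - cnt)).getD 0 + 1
       else 0) := by
  intro m
  induction m using Nat.strong_induction_on with
  | _ m ih =>
    intro cnt p hm hc hp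
    rw [backscanLoop]
    rw [if_neg (by omega : ¬ cnt = 0)]
    by_cases hneg : p < 0
    · rw [if_pos hneg, k_nonpos l p (by omega), if_neg (by omega)]
    · rw [if_neg hneg]
      have hp0 : 0 ≤ p := by omega
      by_cases hz : p = 0
      · subst hz
        have hz' : kOf l 0 = 0 := k_nonpos l 0 le_rfl
        rw [if_neg (by omega)]
        cases hg : PySem.List.pyGet? l (0 - 1) with
        | none => rfl
        | some c =>
          show backscanLoop l (if c = '\n' then cnt - 1 else cnt) (0 - 1) = 0
          rw [backscanLoop.eq_def]
          by_cases hcc : (if c = '\n' then cnt - 1 else cnt) = 0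
          · rw [if_pos hcc]; norm_num
          · rw [if_neg hcc, if_pos (by omega : (0 : Int) - 1 < 0)]
      · have hp1 : 1 ≤ p := by omega
        have hg : PySem.List.pyGet? l (p - 1) = some l[(p - 1).toNat] :=
          PySem.List.pyGet?_eq_some_getElem l (by omega) (by omega)
        rw [hg]
        show backscanLoop l (if l[(p - 1).toNat] = '\n' then cnt - 1 else cnt) (p - 1) = _
        have hpn : (((p - 1).toNat : Int)) = p - 1 := by omega
        have hjlt : (p - 1).toNat < l.length := by omega
        have hps : p - 1 + 1 = p := by ring
        by_cases hnl : l[(p - 1).toNat] = '\n'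
        · have hmem : p - 1 ∈ nlsOf l := by
            rw [← hpn]; exact (mem_nls l (p - 1).toNat hjlt).mpr hnl
          have hk1 : kOf l p = kOf l (p - 1) + 1 := by
            have hks := k_succ l (p - 1)
            rw [hps] at hks
            rw [hks, if_pos hmem]
          have hgc := get_count (nlsOf l) (nls_pairwise l) (p - 1) hmem
          rw [if_pos hnl]
          by_cases hc1 : cnt = 1
          · subst hc1
            rw [backscanLoop, if_pos (by norm_num : (1:Int) - 1 = 0)]
            have hidx : kOf l p - 1 = kOf l (p - 1) := by omega
            rw [hidx]
            unfold kOf at *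
            rw [if_pos (by positivity), PySem.List.pyGet?_natCast]
            rw [hgc.2]
            simp only [Option.getD_some]
          · have := ih ((p - 1 + 1).toNat) (by omega) (cnt - 1) (p - 1)
              rfl (by omega) (by omega)
            rw [this]
            have hidx : kOf l (p - 1) - (cnt - 1) = kOf l p - cnt := by omega
            rw [hidx]
        · have hmem : p - 1 ∉ nlsOf l := by
            rw [← hpn]; exact fun h => hnl ((mem_nls l (p - 1).toNat hjlt).mp h)
          have hk1 : kOf l p = kOf l (p - 1) := by
            have hks := k_succ l (p - 1)
            rw [hps] at hks
            rw [hks, if_neg hmem]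
            ring
          rw [if_neg hnl]
          have := ih ((p - 1 + 1).toNat) (by omega) cnt (p - 1)
            rfl hc (by omega)
          rw [this, hk1]

-- ===== VERDICT (by name: the statement is the Claim_ definition above) =====
theorem do_line_spec : Claim_equal_do_line := by
  intro n buf p _ hPre
  unfold Spec_do_line do_line do_line_alt
  by_cases hn : n ≤ 0
  · rw [if_pos hn]
    have hle : p ≤ (buf.toList.length : Int) := (hPre.2 hn).1
    unfold backscan
    have hneg : -(n - 1) = 1 - n := by ring
    rw [hneg, bwd_eq buf.toList ((p + 1).toNat) (1 - n) p rfl (by omega) hle,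
      if_neg (by omega : ¬ 0 < n)]
  · rw [if_neg hn]
    have hp0 : 0 ≤ p := hPre.1 (by omega)
    rw [fwd_eq buf.toList (((buf.toList.length : Int) - p).toNat) n p rfl (by omega) hp0,
      if_pos (by omega : 0 < n)]
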